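-- pv_equiv track=rewrite | github.com/vinyeee/Algorithm | 241204/Time to Time/time-to-time.py | elapsed_time
-- ===== SOURCE A (Python) =====
-- def elapsed_time(h, m):
--     hour = 0
--     mins = 0
--     t= 0
--     while True:
--         if hour == h and mins == m:
--             break
--
--         t += 1
--         mins += 1
--
--         if mins == 60:
--             hour += 1
--             mins = 0
--     return t
-- ===== SOURCE B (Python) =====
-- def elapsed_time(h, m):
--     # closed form: minutes elapsed from 0:00 to h:m
--     return h * 60 + m
-- ===== Notes on version B (the rewrite author's own statement) =====
-- stated objective: simpler
-- what changed: Replaces the minute-by-minute simulation loop with the closed form h*60+m.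
-- outside the precondition, e.g. on elapsed_time(0, 60): A does not finish within the time limit, B returns 60
import Mathlib
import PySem

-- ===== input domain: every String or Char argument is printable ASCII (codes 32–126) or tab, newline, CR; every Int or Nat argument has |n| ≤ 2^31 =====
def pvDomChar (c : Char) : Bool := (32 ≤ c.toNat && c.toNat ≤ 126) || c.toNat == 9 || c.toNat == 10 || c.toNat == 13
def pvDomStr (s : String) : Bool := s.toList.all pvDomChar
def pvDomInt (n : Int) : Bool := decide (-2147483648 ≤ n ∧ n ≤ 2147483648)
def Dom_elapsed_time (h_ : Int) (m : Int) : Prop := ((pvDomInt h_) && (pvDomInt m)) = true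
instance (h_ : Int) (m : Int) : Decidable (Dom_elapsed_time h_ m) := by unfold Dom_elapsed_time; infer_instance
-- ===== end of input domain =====

-- B replaces A's minute-by-minute simulation loop with the closed form h*60+m.

-- ===== PORT A =====
-- A's unbounded 'while True' simulation, with a fuel bound large enough to cover
-- every terminating run (the loop, when it terminates, runs exactly h*60+m+1 checks);
-- when the fuel runs out (only on inputs outside Pre_, where Python diverges) it
-- returns the accumulator.
def elapsedLoop : Nat → Int → Int → Int → Int → Int → Int
  | 0, _, _, _, _, t => t
  | fuel+1, h_, m, hour, mins, t =>
    if hour = h_ ∧ mins = m then t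
    else
      let t' := t + 1
      let mins' := mins + 1
      if mins' = 60 then elapsedLoop fuel h_ m (hour + 1) 0 t'
      else elapsedLoop fuel h_ m hour mins' t'

def elapsed_time (h_ : Int) (m : Int) : Int :=
  elapsedLoop ((h_ * 60 + m).toNat + 1) h_ m 0 0 0

-- ===== PORT B =====
def elapsed_time_alt (h_ : Int) (m : Int) : Int := h_ * 60 + m

-- ===== PRECONDITION & SPEC =====
-- Pre_ excludes exactly the inputs on which A's while-loop never reaches
-- (hour, mins) = (h, m) and so diverges: h < 0, m < 0 or m ≥ 60.
def Pre_elapsed_time (h_ : Int) (m : Int) : Prop := 0 ≤ h_ ∧ 0 ≤ m ∧ m < 60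
instance (h_ : Int) (m : Int) : Decidable (Pre_elapsed_time h_ m) := by unfold Pre_elapsed_time; infer_instance
def pvWitness_elapsed_time : Int × Int := (3, 25)

def Spec_elapsed_time (h_ : Int) (m : Int) (out : Int) : Prop := out = elapsed_time_alt h_ m
instance (h_ : Int) (m : Int) (out : Int) : Decidable (Spec_elapsed_time h_ m out) := by unfold Spec_elapsed_time; infer_instance

-- ===== CLAIM (what is proved, stated in full; the proofs are below) =====
def Claim_equal_elapsed_time : Prop := ∀ (h_ : Int) (m : Int), Dom_elapsed_time h_ m → Pre_elapsed_time h_ m → Spec_elapsed_time h_ m (elapsed_time h_ m)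

-- ===== LEMMAS AND PROOFS =====

-- Loop invariant: with t = hour*60+mins, mins in [0,60), state not past the target,
-- and enough fuel left, the loop returns h*60+m.
theorem elapsedLoop_eq (h_ m : Int) (hm0 : 0 ≤ m) (hm60 : m < 60) :
    ∀ (fuel : Nat) (hour mins t : Int),
      0 ≤ mins → mins < 60 → t = hour * 60 + mins →
      hour * 60 + mins ≤ h_ * 60 + m →
      (h_ * 60 + m - (hour * 60 + mins)).toNat < fuel →
      elapsedLoop fuel h_ m hour mins t = h_ * 60 + m := by
  intro fuel
  induction fuel with
  | zero => intro hour mins t _ _ _ _ hf; omega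
  | succ n ih =>
    intro hour mins t h0 h60 ht hle hf
    by_cases hdone : hour = h_ ∧ mins = m
    · simp [elapsedLoop, hdone]; omega
    · have hlt : hour * 60 + mins < h_ * 60 + m := by
        rcases lt_or_eq_of_le hle with h | h
        · exact h
        · exfalso; apply hdone; constructor <;> omega
      by_cases hm : mins + 1 = 60
      · simp only [elapsedLoop, if_neg hdone, if_pos hm]
        exact ih (hour + 1) 0 (t + 1) (by omega) (by omega) (by omega) (by omega) (by omega)
      · simp only [elapsedLoop, if_neg hdone, if_neg hm]
        exact ih hour (mins + 1) (t + 1) (by omega) (by omega) (by omega) (by omega) (by omega)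

-- ===== VERDICT (by name: the statement is the Claim_ definition above) =====
theorem elapsed_time_spec : Claim_equal_elapsed_time := by
  intro h_ m _ hpre
  obtain ⟨hh, hm0, hm60⟩ := hpre
  unfold Spec_elapsed_time elapsed_time elapsed_time_alt
  exact elapsedLoop_eq h_ m hm0 hm60 _ 0 0 0 le_rfl (by omega) (by omega) (by omega) (by omega)
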